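-- pv_equiv track=rewrite | github.com/ShannoonRuaaa/balancing-chemistry-equations | main.py | split_formula
-- ===== SOURCE A (Python) =====
-- def split_formula(formula):
--     reactants = []
--     products = []
--     list = formula.split()
--     isreactant = True
--     for i in list:
--         if i == "->":
--             isreactant = False
--         elif i == "+":
--             continue
--         elif isreactant:
--             reactants.append(i)
--         else:
--             products.append(i)
--     return reactants, products
-- ===== SOURCE B (Python) =====
-- def split_formula(formula):
--     tokens = formula.split()
--     i = tokens.index("->") if "->" in tokens else len(tokens)
--     reactants = [t for t in tokens[:i] if t != "+"]
--     products = [t for t in tokens[i + 1:] if t != "+" and t != "->"]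
--     return reactants, products
-- ===== Notes on version B (the rewrite author's own statement) =====
-- stated objective: simpler
-- what changed: Replaces A's stateful flag-driven accumulation loop with locating the first arrow separator token and building reactants/products as two filtered slices around that pivot.
import Mathlib
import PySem

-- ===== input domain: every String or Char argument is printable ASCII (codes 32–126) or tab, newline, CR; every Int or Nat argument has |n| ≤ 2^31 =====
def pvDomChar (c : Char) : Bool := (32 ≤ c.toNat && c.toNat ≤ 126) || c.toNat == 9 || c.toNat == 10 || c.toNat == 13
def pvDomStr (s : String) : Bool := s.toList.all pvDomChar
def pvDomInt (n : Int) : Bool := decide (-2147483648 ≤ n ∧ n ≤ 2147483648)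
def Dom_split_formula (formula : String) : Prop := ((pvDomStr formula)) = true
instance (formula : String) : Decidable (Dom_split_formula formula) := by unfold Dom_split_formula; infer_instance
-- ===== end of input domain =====

-- B replaces A's flag-driven accumulator loop with a locate-first-'->'-pivot then two filtered slices (simpler decomposition, same cost).

-- ===== PORT A =====
-- A's loop body: state = (reactants, products, isreactant)
def splitStep (st : List String × List String × Bool) (i : String) :
    List String × List String × Bool :=
  if i = "->" then (st.1, st.2.1, false)
  else if i = "+" then st
  else if st.2.2 then (st.1 ++ [i], st.2.1, st.2.2)
  else (st.1, st.2.1 ++ [i], st.2.2)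

def split_formula (formula : String) : List String × List String :=
  let list := PySem.Str.split₀ formula
  let st := list.foldl splitStep ([], [], true)
  (st.1, st.2.1)

-- ===== PORT B =====
def split_formula_alt (formula : String) : List String × List String :=
  let tokens := PySem.Str.split₀ formula
  let i : Nat := if tokens.contains "->" then (PySem.List.index? tokens "->").getD 0
                 else tokens.length
  ((tokens.take i).filter (fun t => t != "+"),
   (tokens.drop (i + 1)).filter (fun t => t != "+" && t != "->"))

-- ===== PRECONDITION & SPEC =====
def Spec_split_formula (formula : String) (out : List String × List String) : Prop := out = split_formula_alt formula
instance (formula : String) (out : List String × List String) : Decidable (Spec_split_formula formula out) := by unfold Spec_split_formula; infer_instance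

-- ===== CLAIM (what is proved, stated in full; the proofs are below) =====
def Claim_equal_split_formula : Prop := ∀ (formula : String), Dom_split_formula formula → Spec_split_formula formula (split_formula formula)

-- ===== LEMMAS AND PROOFS =====

theorem step_arrow (r p : List String) (b : Bool) : splitStep (r, p, b) "->" = (r, p, false) := by
  simp [splitStep]

theorem step_plus (r p : List String) (b : Bool) : splitStep (r, p, b) "+" = (r, p, b) := by
  simp [splitStep]

theorem step_true (t : String) (h1 : t ≠ "->") (h2 : t ≠ "+") (r p : List String) :
    splitStep (r, p, true) t = (r ++ [t], p, true) := by
  simp [splitStep, h1, h2]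

theorem step_false (t : String) (h1 : t ≠ "->") (h2 : t ≠ "+") (r p : List String) :
    splitStep (r, p, false) t = (r, p ++ [t], false) := by
  simp [splitStep, h1, h2]

-- After the flag has dropped, every non-"+", non-"->" token is appended to products.
theorem foldl_splitStep_false (ts : List String) (r p : List String) :
    ts.foldl splitStep (r, p, false)
      = (r, p ++ ts.filter (fun t => t != "+" && t != "->"), false) := by
  induction ts generalizing p with
  | nil => simp
  | cons t ts ih =>
    by_cases h1 : t = "->"
    · subst h1
      rw [List.foldl_cons, step_arrow, ih p]
      simp
    · by_cases h2 : t = "+"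
      · subst h2
        rw [List.foldl_cons, step_plus, ih p]
        simp
      · rw [List.foldl_cons, step_false t h1 h2, ih (p ++ [t])]
        simp [h1, h2]

-- While the flag is up, the loop splits at the first "->" exactly as B's slices do.
theorem foldl_splitStep_true (ts : List String) (r p : List String) :
    ts.foldl splitStep (r, p, true)
      = (r ++ (ts.take (ts.idxOf "->")).filter (fun t => t != "+"),
         p ++ (ts.drop (ts.idxOf "->" + 1)).filter (fun t => t != "+" && t != "->"),
         !ts.contains "->") := by
  induction ts generalizing r with
  | nil => simp
  | cons t ts ih =>
    by_cases h1 : t = "->"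
    · subst h1
      rw [List.foldl_cons, step_arrow, foldl_splitStep_false ts r p]
      simp [List.idxOf_cons_self]
    · by_cases h2 : t = "+"
      · subst h2
        rw [List.foldl_cons, step_plus, ih r]
        simp [List.idxOf_cons_ne _ h1, Nat.succ_eq_add_one, Ne.symm h1]
      · rw [List.foldl_cons, step_true t h1 h2, ih (r ++ [t])]
        simp [List.idxOf_cons_ne _ h1, Nat.succ_eq_add_one, Ne.symm h1, h2]

-- B's guarded index computation equals List.idxOf (which is ts.length when "->" is absent).
theorem idxOf_eq_B_index (ts : List String) :
    (if ts.contains "->" then (PySem.List.index? ts "->").getD 0 else ts.length)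
      = ts.idxOf "->" := by
  induction ts with
  | nil => simp
  | cons t ts ih =>
    by_cases h : t = "->"
    · subst h
      simp [PySem.List.index?_eq_idxOf?, List.idxOf?_cons, List.idxOf_cons_self]
    · cases hs : ts.idxOf? "->" with
      | none =>
        have hm : "->" ∉ ts := List.idxOf?_eq_none_iff.mp hs
        simp [PySem.List.index?_eq_idxOf?, hm, Ne.symm h,
          List.idxOf_cons_ne _ h, List.idxOf_eq_length_iff.mpr hm]
      | some k =>
        have hm : "->" ∈ ts := by
          by_contra hm
          rw [List.idxOf?_eq_none_iff.mpr hm] at hs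
          cases hs
        have hc : ts.contains "->" = true := by simpa using hm
        rw [PySem.List.index?_eq_idxOf?] at ih
        rw [if_pos hc, hs] at ih
        simp [PySem.List.index?_eq_idxOf?, hc, List.idxOf?_cons, Ne.symm h, h, hm,
          List.idxOf_cons_ne _ h, hs, ← ih]

-- ===== VERDICT (by name: the statement is the Claim_ definition above) =====
theorem split_formula_spec : Claim_equal_split_formula := by
  intro formula _
  unfold Spec_split_formula split_formula split_formula_alt
  dsimp only
  rw [idxOf_eq_B_index, foldl_splitStep_true]
  simp
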